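-- pv_equiv track=rewrite | github.com/rzhu-0812/Random-Coding-Shit | Competetive Programming/USACO/Bronze/December 2024/Its_Mooin_Time.py | possible_moos
-- ===== SOURCE A (Python) =====
-- def possible_moos(N, F, s):
--     poss_m = set()
--
--     for i in range(N):
--         for c in 'abcdefghijklmnopqrstuvwxyz':
--             if s[i] == c:
--                 continue
--
--             mod_s = s[:i] + c + s[i+1:]
--             poss_m.update(find_moos(mod_s, F))
--
--     return sorted(poss_m)
--
-- def find_moos(s, F):
--     moos = set()
--     L = len(s)
--
--     substring_counts = {}
--     for i in range(L - 2):
--         substring = s[i:i+3]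
--         if substring not in substring_counts:
--             substring_counts[substring] = 0
--         substring_counts[substring] += 1
--
--     for i in range(L - 2):
--         if s[i] == s[i + 1]:
--             continue
--
--         if i + 2 < L and s[i + 1] == s[i + 2]:
--             moo = s[i] + s[i + 1] + s[i + 2]
--             if moo in substring_counts and substring_counts[moo] >= F:
--                 moos.add(moo)
--
--     return moos
-- ===== SOURCE B (Python) =====
-- ALPHA = 'abcdefghijklmnopqrstuvwxyz'
--
--
-- def _free_index_exists(N, ps):
--     # ps: ascending occurrence starts; is there an i in [0, N) with no p in [i-2, i]?
--     cur = 0  # smallest index not yet known to be blocked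
--     for p in ps:
--         if p > cur:
--             break
--         if p + 3 > cur:
--             cur = p + 3
--     return cur < N
--
--
-- def possible_moos(N, F, s):
--     L = len(s)
--     Fm = F if F > 1 else 1
--
--     pos = {}  # trigram -> ascending list of its occurrence starts in s
--     for j in range(L - 2):
--         t = s[j:j + 3]
--         pos[t] = pos.get(t, []) + [j]
--
--     res = set()
--
--     # a trigram already qualifying in s stays qualified whenever some edit
--     # position's 3-wide window misses every one of its occurrences
--     for t, ps in pos.items():
--         if t[0] != t[1] and t[1] == t[2] and len(ps) >= Fm and _free_index_exists(N, ps):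
--             res.add(t)
--
--     # per edit, only the <= 3 trigrams overlapping the edited position change
--     for i in range(N):
--         lo = 0 if i < 2 else i - 2
--         hi = i if i <= L - 3 else L - 3
--         old = [s[j:j + 3] for j in range(lo, hi + 1)]
--         for c in ALPHA:
--             if c == s[i]:
--                 continue
--             new = [s[j:i] + c + s[i + 1:j + 3] for j in range(lo, hi + 1)]
--             for t in set(old) | set(new):
--                 cnt = len(pos.get(t, [])) - old.count(t) + new.count(t)
--                 if t[0] != t[1] and t[1] == t[2] and cnt >= Fm:
--                     res.add(t)
--
--     return sorted(res)
-- ===== Notes on version B (the rewrite author's own statement) =====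
-- stated objective: faster
-- what changed: A rebuilds every one-character variant of s and rescans it with a fresh trigram-count dict (O(26*N*L)); B builds one trigram->positions index of s, keeps a trigram that already qualifies whenever some edit window misses all its occurrences (one O(L) coverage scan per trigram), and for each edit recomputes counts only for the <=3 trigrams overlapping the edited position (O(L + 26*N) total).
import Mathlib
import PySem

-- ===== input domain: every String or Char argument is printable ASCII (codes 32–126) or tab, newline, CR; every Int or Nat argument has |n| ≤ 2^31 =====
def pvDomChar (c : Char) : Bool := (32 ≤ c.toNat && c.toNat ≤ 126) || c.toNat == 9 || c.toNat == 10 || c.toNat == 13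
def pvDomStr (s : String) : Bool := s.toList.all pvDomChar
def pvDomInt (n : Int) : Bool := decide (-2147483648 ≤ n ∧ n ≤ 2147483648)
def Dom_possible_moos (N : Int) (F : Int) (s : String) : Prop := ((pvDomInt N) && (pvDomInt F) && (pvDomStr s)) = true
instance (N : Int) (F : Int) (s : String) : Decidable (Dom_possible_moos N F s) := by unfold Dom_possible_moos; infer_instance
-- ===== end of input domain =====

-- B replaces A's rebuild-and-rescan of every one-char variant (O(26·N·L)) by one trigram-position
-- index of s plus O(1) local window updates per edit (O(L + 26·N)); measured faster.

-- ===== PORT A =====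
def findMoos (ds : List Char) (F : Int) : PySem.Set String :=
  let L : Int := ds.length
  let counts := (PySem.List.pyRange 0 (L - 2) 1).foldl (fun d i =>
      let sub := String.ofList (PySem.List.slice ds (some i) (some (i + 3)))
      let d' := if d.contains sub then d else d.insert sub 0
      d'.modify sub 0 (· + 1)) (PySem.Dict.empty)
  (PySem.List.pyRange 0 (L - 2) 1).foldl (fun moos i =>
      if PySem.List.pyGetD ds i ' ' == PySem.List.pyGetD ds (i + 1) ' ' then moos
      else if i + 2 < L then
        if PySem.List.pyGetD ds (i + 1) ' ' == PySem.List.pyGetD ds (i + 2) ' ' then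
          if counts.contains (String.ofList [PySem.List.pyGetD ds i ' ', PySem.List.pyGetD ds (i + 1) ' ',
              PySem.List.pyGetD ds (i + 2) ' ']) && decide (F ≤ counts.getD (String.ofList [PySem.List.pyGetD ds i ' ',
              PySem.List.pyGetD ds (i + 1) ' ', PySem.List.pyGetD ds (i + 2) ' ']) 0)
          then PySem.Set.add moos (String.ofList [PySem.List.pyGetD ds i ' ', PySem.List.pyGetD ds (i + 1) ' ',
              PySem.List.pyGetD ds (i + 2) ' '])
          else moos
        else moos
      else moos) (PySem.Set.empty : PySem.Set String)

def possible_moos (N : Int) (F : Int) (s : String) : List String :=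
  let cs := s.toList
  let possM := (PySem.List.pyRange 0 N 1).foldl (fun acc i =>
    "abcdefghijklmnopqrstuvwxyz".toList.foldl (fun acc c =>
      if PySem.List.pyGetD cs i ' ' == c then acc
      else
        let modS := PySem.List.slice cs none (some i) ++ [c] ++ PySem.List.slice cs (some (i + 1)) none
        PySem.Set.update acc (findMoos modS F)) acc) (PySem.Set.empty : PySem.Set String)
  PySem.List.sorted possM (fun x => x) false

-- ===== PORT B =====
def freeIndexExistsGo (N : Int) (cur : Int) : List Int → Bool
  | [] => decide (cur < N)
  | p :: rest =>
      if p > cur then decide (cur < N)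
      else freeIndexExistsGo N (if p + 3 > cur then p + 3 else cur) rest

def freeIndexExists (N : Int) (ps : List Int) : Bool := freeIndexExistsGo N 0 ps

def possible_moos_alt (N : Int) (F : Int) (s : String) : List String :=
  let cs := s.toList
  let L : Int := cs.length
  let Fm : Int := if F > 1 then F else 1
  let pos : PySem.Dict String (List Int) := (PySem.List.pyRange 0 (L - 2) 1).foldl (fun d j =>
      let t := String.ofList (PySem.List.slice cs (some j) (some (j + 3)))
      d.insert t (d.getD t [] ++ [j])) PySem.Dict.empty
  let res₁ := pos.items.foldl (fun r tp =>
      let tc := tp.1.toList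
      if (PySem.List.pyGetD tc 0 ' ' != PySem.List.pyGetD tc 1 ' ')
         && (PySem.List.pyGetD tc 1 ' ' == PySem.List.pyGetD tc 2 ' ')
         && decide (Fm ≤ (tp.2.length : Int)) && freeIndexExists N tp.2
      then PySem.Set.add r tp.1 else r) (PySem.Set.empty : PySem.Set String)
  let res := (PySem.List.pyRange 0 N 1).foldl (fun r i =>
      let lo : Int := if i < 2 then 0 else i - 2
      let hi : Int := if i ≤ L - 3 then i else L - 3
      let old := (PySem.List.pyRange lo (hi + 1) 1).map
          (fun j => String.ofList (PySem.List.slice cs (some j) (some (j + 3))))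
      "abcdefghijklmnopqrstuvwxyz".toList.foldl (fun r c =>
        if c == PySem.List.pyGetD cs i ' ' then r
        else
          let nw := (PySem.List.pyRange lo (hi + 1) 1).map (fun j =>
              String.ofList (PySem.List.slice cs (some j) (some i) ++ [c]
                         ++ PySem.List.slice cs (some (i + 1)) (some (j + 3))))
          (PySem.Set.union (PySem.Set.ofList old) (PySem.Set.ofList nw)).foldl (fun r t =>
            let cnt : Int := ((pos.getD t []).length : Int) - (old.count t : Int) + (nw.count t : Int)
            let tc := t.toList
            if (PySem.List.pyGetD tc 0 ' ' != PySem.List.pyGetD tc 1 ' ')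
               && (PySem.List.pyGetD tc 1 ' ' == PySem.List.pyGetD tc 2 ' ')
               && decide (Fm ≤ cnt)
            then PySem.Set.add r t else r) r) r) res₁
  PySem.List.sorted res (fun x => x) false

-- ===== PRECONDITION & SPEC =====
-- Pre_ excludes exactly the inputs where Python A raises IndexError: s[i] with N exceeding len(s).
def Pre_possible_moos (N : Int) (F : Int) (s : String) : Prop := N ≤ (s.toList.length : Int)
instance (N : Int) (F : Int) (s : String) : Decidable (Pre_possible_moos N F s) := by
  unfold Pre_possible_moos; infer_instance

def pvWitness_possible_moos : Int × Int × String := (4, 1, "mooo")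

def Spec_possible_moos (N : Int) (F : Int) (s : String) (out : List String) : Prop :=
  out = possible_moos_alt N F s
instance (N : Int) (F : Int) (s : String) (out : List String) : Decidable (Spec_possible_moos N F s out) := by
  unfold Spec_possible_moos; infer_instance

-- ===== CLAIM (what is proved, stated in full; the proofs are below) =====
def Claim_equal_possible_moos : Prop := ∀ (N : Int) (F : Int) (s : String),
  Dom_possible_moos N F s → Pre_possible_moos N F s →
  Spec_possible_moos N F s (possible_moos N F s)

-- ===== LEMMAS AND PROOFS =====
-- generic membership lemma for accumulate-only set folds
lemma pv_mem_foldl_step {β : Type} (step : PySem.Set String → β → PySem.Set String)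
    (P : β → String → Prop)
    (h : ∀ s x T, T ∈ step s x ↔ T ∈ s ∨ P x T) :
    ∀ (l : List β) (s : PySem.Set String) (T : String),
      T ∈ l.foldl step s ↔ T ∈ s ∨ ∃ x ∈ l, P x T := by
  intro l
  induction l with
  | nil => simp
  | cons x xs ih =>
    intro s T
    simp only [List.foldl_cons, ih, h]
    constructor
    · rintro ((hs | hp) | ⟨y, hy, hPy⟩)
      · exact Or.inl hs
      · exact Or.inr ⟨x, by simp, hp⟩
      · exact Or.inr ⟨y, by simp [hy], hPy⟩
    · rintro (hs | ⟨y, hy, hPy⟩)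
      · exact Or.inl (Or.inl hs)
      · rcases List.mem_cons.mp hy with h1 | h1
        · subst h1; exact Or.inl (Or.inr hPy)
        · exact Or.inr ⟨y, h1, hPy⟩

lemma pv_nodup_foldl_step {β : Type} (step : PySem.Set String → β → PySem.Set String)
    (h : ∀ s x, List.Nodup s → List.Nodup (step s x)) :
    ∀ (l : List β) (s : PySem.Set String), List.Nodup s → List.Nodup (l.foldl step s) := by
  intro l
  induction l with
  | nil => intro s hs; simpa using hs
  | cons x xs ih => intro s hs; exact ih _ (h s x hs)

-- A's counter loop: "if sub not in d: d[sub]=0; d[sub]+=1"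
lemma pv_counts_getD (l : List String) :
    ∀ (d : PySem.Dict String Int) (v : String),
      (l.foldl (fun d x =>
        (if d.contains x then d else d.insert x 0).modify x 0 (· + 1)) d).getD v 0
      = d.getD v 0 + l.count v := by
  induction l with
  | nil => simp
  | cons x xs ih =>
    intro d v
    simp only [List.foldl_cons, ih]
    have hstep : ((if d.contains x then d else d.insert x 0).modify x 0 (· + 1)).getD v 0
        = if v = x then d.getD v 0 + 1 else d.getD v 0 := by
      by_cases hc : d.contains x
      · by_cases hv : v = x <;> simp [hc, PySem.Dict.getD_modify, hv]
      · by_cases hv : v = x <;>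
          simp [hc, PySem.Dict.getD_modify, PySem.Dict.getD_insert, hv,
                PySem.Dict.getD_of_not_contains d (d0 := (0:Int)) (by simpa using hc)]
    rw [hstep]
    by_cases hv : v = x
    · simp only [hv, if_true, List.count_cons_self]
      push_cast; ring
    · simp [hv, Ne.symm hv]

lemma pv_counts_contains (l : List String) :
    ∀ (d : PySem.Dict String Int) (v : String),
      (l.foldl (fun d x =>
        (if d.contains x then d else d.insert x 0).modify x 0 (· + 1)) d).contains v
      = (d.contains v || l.contains v) := by
  induction l with
  | nil => simp
  | cons x xs ih =>
    intro d v
    simp only [List.foldl_cons, ih, PySem.Dict.contains_modify]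
    by_cases hv : v = x
    · by_cases hc : d.contains x <;> simp [hc, hv]
    · have hbx : (v == x) = false := by simpa using hv
      by_cases hc : d.contains x <;> simp [hc, hbx, hv, PySem.Dict.contains_insert]

-- B's position-index loop: "pos[t] = pos.get(t, []) + [j]"
lemma pv_pos_getD {β : Type} (g : β → String) (l : List β) :
    ∀ (d : PySem.Dict String (List β)) (T : String),
      (l.foldl (fun d j => d.insert (g j) (d.getD (g j) [] ++ [j])) d).getD T []
      = d.getD T [] ++ l.filter (fun j => g j == T) := by
  induction l with
  | nil => simp
  | cons x xs ih =>
    intro d T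
    simp only [List.foldl_cons, ih, PySem.Dict.getD_insert, List.filter_cons]
    by_cases hv : T = g x
    · simp [hv]
    · simp [hv, beq_iff_eq, Ne.symm hv]

lemma pv_pos_mem_keys {β : Type} (g : β → String) (l : List β) :
    ∀ (d : PySem.Dict String (List β)) (T : String),
      (T ∈ (l.foldl (fun d j => d.insert (g j) (d.getD (g j) [] ++ [j])) d).keys
      ↔ T ∈ d.keys ∨ ∃ j ∈ l, g j = T) := by
  induction l with
  | nil => simp
  | cons x xs ih =>
    intro d T
    simp only [List.foldl_cons, ih, PySem.Dict.mem_keys_insert]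
    constructor
    · rintro ((h1 | h1) | ⟨j, hj, hgj⟩)
      · exact Or.inr ⟨x, by simp, h1.symm⟩
      · exact Or.inl h1
      · exact Or.inr ⟨j, by simp [hj], hgj⟩
    · rintro (h1 | ⟨j, hj, hgj⟩)
      · exact Or.inl (Or.inr h1)
      · rcases List.mem_cons.mp hj with h2 | h2
        · subst h2; exact Or.inl (Or.inl hgj.symm)
        · exact Or.inr ⟨j, h2, hgj⟩

-- B's scan for an edit position whose window misses every occurrence
lemma pv_freeGo_spec (N : Int) :
    ∀ (ps : List Int) (cur : Int), ps.Pairwise (· < ·) →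
      (freeIndexExistsGo N cur ps = true ↔
        ∃ i : Int, cur ≤ i ∧ i < N ∧ ∀ p ∈ ps, ¬(p ≤ i ∧ i ≤ p + 2)) := by
  intro ps
  induction ps with
  | nil =>
    intro cur _
    simp only [freeIndexExistsGo, decide_eq_true_eq]
    exact ⟨fun h => ⟨cur, le_refl _, h, by simp⟩, fun ⟨i, h1, h2, _⟩ => lt_of_le_of_lt h1 h2⟩
  | cons p rest ih =>
    intro cur hsort
    have hrest : rest.Pairwise (· < ·) := hsort.of_cons
    have hlt : ∀ q ∈ rest, p < q := fun q hq => List.rel_of_pairwise_cons hsort hq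
    simp only [freeIndexExistsGo]
    by_cases hp : p > cur
    · simp only [hp, if_true, decide_eq_true_eq]
      constructor
      · intro h
        refine ⟨cur, le_refl _, h, ?_⟩
        intro q hq
        rcases List.mem_cons.mp hq with h2 | h2
        · omega
        · have := hlt q h2; omega
      · rintro ⟨i, h1, h2, _⟩; omega
    · simp only [hp, if_false]
      rw [ih _ hrest]
      constructor
      · rintro ⟨i, h1, h2, h3⟩
        refine ⟨i, ?_, h2, fun q hq => ?_⟩
        · split_ifs at h1 <;> omega
        · rcases List.mem_cons.mp hq with h2' | h2'
          · subst h2'; split_ifs at h1 <;> omega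
          · exact h3 q h2'
      · rintro ⟨i, h1, h2, h3⟩
        have hpi : ¬(p ≤ i ∧ i ≤ p + 2) := h3 p (by simp)
        refine ⟨i, by split_ifs <;> omega, h2, fun q hq => h3 q (by simp [hq])⟩

-- trigram machinery (proof-side definitions)
def pvTri (cs : List Char) (j : Nat) : List Char := (cs.drop j).take 3
def pvTriS (cs : List Char) (j : Nat) : String := String.ofList (pvTri cs j)
def pvTS (cs : List Char) : List String := (List.range (cs.length - 2)).map (pvTriS cs)
def pvMod (cs : List Char) (i : Nat) (c : Char) : List Char := cs.take i ++ [c] ++ cs.drop (i + 1)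
def pvNewT (cs : List Char) (i j : Nat) (c : Char) : List Char :=
  (cs.drop j).take (i - j) ++ [c] ++ (cs.drop (i + 1)).take (j + 3 - (i + 1))
def pvWin (cs : List Char) (i : Nat) : List Nat :=
  List.range' (i - 2) (min i (cs.length - 3) + 1 - (i - 2))
def pvOld (cs : List Char) (i : Nat) : List String := (pvWin cs i).map (pvTriS cs)
def pvNw (cs : List Char) (i : Nat) (c : Char) : List String :=
  (pvWin cs i).map (fun j => String.ofList (pvNewT cs i j c))
def pvShape (t : List Char) : Bool :=
  (PySem.List.pyGetD t 0 ' ' != PySem.List.pyGetD t 1 ' ')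
  && (PySem.List.pyGetD t 1 ' ' == PySem.List.pyGetD t 2 ' ')
def pvPos (cs : List Char) (T : String) : List Nat :=
  (List.range (cs.length - 2)).filter (fun j => pvTriS cs j == T)

lemma pv_length_mod (cs : List Char) (i : Nat) (c : Char) (hi : i < cs.length) :
    (pvMod cs i c).length = cs.length := by
  simp [pvMod]; omega

lemma pv_tri_mod_lt (cs : List Char) (i j : Nat) (c : Char) (hj : j + 2 < i) (hi : i ≤ cs.length) :
    pvTri (pvMod cs i c) j = pvTri cs j := by
  have htake : (pvMod cs i c).take i = cs.take i := by
    unfold pvMod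
    rw [List.take_append, List.take_append]
    have h1 : (cs.take i).length = i := by simp; omega
    simp [h1, List.take_take]
  have key : ∀ ds : List Char, ((ds.take i).drop j).take 3 = (ds.drop j).take 3 := by
    intro ds
    rw [List.drop_take, List.take_take]
    congr 1; omega
  unfold pvTri
  rw [← key (pvMod cs i c), ← key cs, htake]

lemma pv_tri_mod_gt (cs : List Char) (i j : Nat) (c : Char) (hj : i < j) (hi : i < cs.length) :
    pvTri (pvMod cs i c) j = pvTri cs j := by
  have hdrop : (pvMod cs i c).drop j = cs.drop j := by
    unfold pvMod
    rw [List.append_assoc, List.drop_append]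
    have h1 : (cs.take i).length = i := by simp; omega
    have h2 : (cs.take i).drop j = [] := List.drop_eq_nil_of_le (by omega)
    rw [h1, h2]
    have h3 : ([c] : List Char).drop (j - i) = [] := List.drop_eq_nil_of_le (by simp; omega)
    have h4 : (([c] : List Char) ++ cs.drop (i+1)).drop (j - i)
        = ([c] : List Char).drop (j - i) ++ (cs.drop (i+1)).drop (j - i - 1) := by
      rw [List.drop_append]; simp
    rw [h4, h3, List.drop_drop]
    have : i + 1 + (j - i - 1) = j := by omega
    rw [this]; simp
  unfold pvTri; rw [hdrop]

lemma pv_tri_mod_win (cs : List Char) (i j : Nat) (c : Char)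
    (h1 : i ≤ j + 2) (h2 : j ≤ i) (hi : i < cs.length) :
    pvTri (pvMod cs i c) j = pvNewT cs i j c := by
  have hl1 : (cs.take i).length = i := by simp; omega
  have hdrop : (pvMod cs i c).drop j
      = (cs.drop j).take (i - j) ++ [c] ++ cs.drop (i + 1) := by
    unfold pvMod
    rw [List.drop_append, List.drop_append, hl1, List.drop_take]
    have e1 : j - i = 0 := by omega
    have e2 : j - (cs.take i ++ [c]).length = 0 := by simp [hl1]; omega
    rw [e1, e2]
    simp
  unfold pvTri pvNewT
  rw [hdrop]
  have hlen : ((cs.drop j).take (i - j)).length = i - j := by simp; omega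
  rw [List.append_assoc, List.take_append, hlen]
  have e3 : (([c] : List Char) ++ cs.drop (i+1)).take (3 - (i - j))
      = [c] ++ (cs.drop (i+1)).take (3 - (i - j) - 1) := by
    rw [List.take_append]
    congr 1
    apply List.take_of_length_le; simp; omega
  have e4 : ((cs.drop j).take (i-j)).take 3 = (cs.drop j).take (i-j) := by
    rw [List.take_take]; congr 1; omega
  have e5 : (3 : Nat) - (i - j) - 1 = j + 3 - (i + 1) := by omega
  rw [e3, e4, e5, List.append_assoc]

lemma pv_mem_win (cs : List Char) (i j : Nat) (hL : 3 ≤ cs.length) (hi : i < cs.length) :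
    j ∈ pvWin cs i ↔ i ≤ j + 2 ∧ j ≤ i ∧ j ≤ cs.length - 3 := by
  unfold pvWin
  rw [List.mem_range']
  constructor
  · rintro ⟨m, hm, rfl⟩; omega
  · intro h; exact ⟨j - (i - 2), by omega, by omega⟩

lemma pv_range'_split (s a n : Nat) (h : a ≤ n) :
    List.range' s n = List.range' s a ++ List.range' (s + a) (n - a) := by
  have := List.range'_append (s := s) (m := a) (n := n - a) (step := 1)
  simp only [one_mul] at this
  rw [this]
  congr 1; omega

-- the trigram-count ledger: counts in the edited string differ from s only inside the window
lemma pv_count_eq (cs : List Char) (i : Nat) (c : Char) (T : String)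
    (hL : 3 ≤ cs.length) (hi : i < cs.length) :
    (pvTS (pvMod cs i c)).count T + (pvOld cs i).count T
    = (pvTS cs).count T + (pvNw cs i c).count T := by
  have hlm := pv_length_mod cs i c hi
  have hcnt : ∀ ds : List Char, (pvTS ds).count T
      = (List.range (ds.length - 2)).countP (fun j => pvTriS ds j == T) := by
    intro ds
    rw [pvTS, List.count_eq_countP, List.countP_map]
    rfl
  have hwin : pvWin cs i = List.range' (i - 2) (min i (cs.length - 3) + 1 - (i - 2)) := rfl
  have hsplit : List.range (cs.length - 2)
      = List.range' 0 (i - 2) ++ pvWin cs i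
        ++ List.range' (min i (cs.length - 3) + 1)
            (cs.length - 2 - (min i (cs.length - 3) + 1)) := by
    rw [List.range_eq_range', pv_range'_split 0 (i - 2) _ (by omega), Nat.zero_add,
        pv_range'_split (i - 2) (min i (cs.length - 3) + 1 - (i - 2)) _ (by omega), hwin]
    rw [List.append_assoc]
    have e : i - 2 + (min i (cs.length - 3) + 1 - (i - 2)) = min i (cs.length - 3) + 1 := by omega
    rw [e]
    have e2 : cs.length - 2 - (i - 2) - (min i (cs.length - 3) + 1 - (i - 2))
        = cs.length - 2 - (min i (cs.length - 3) + 1) := by omega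
    rw [e2]
  have hpre : ∀ j ∈ List.range' 0 (i - 2), pvTriS (pvMod cs i c) j = pvTriS cs j := by
    intro j hj
    rw [List.mem_range'] at hj
    obtain ⟨m, hm, rfl⟩ := hj
    unfold pvTriS
    rw [pv_tri_mod_lt cs i _ c (by omega) (by omega)]
  have hpost : ∀ j ∈ List.range' (min i (cs.length - 3) + 1)
      (cs.length - 2 - (min i (cs.length - 3) + 1)), pvTriS (pvMod cs i c) j = pvTriS cs j := by
    intro j hj
    rw [List.mem_range'] at hj
    obtain ⟨m, hm, rfl⟩ := hj
    unfold pvTriS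
    rw [pv_tri_mod_gt cs i _ c (by omega) hi]
  have hmid : ∀ j ∈ pvWin cs i, pvTri (pvMod cs i c) j = pvNewT cs i j c := by
    intro j hj
    rw [pv_mem_win cs i j hL hi] at hj
    exact pv_tri_mod_win cs i j c hj.1 hj.2.1 hi
  have holdc : (pvOld cs i).count T = (pvWin cs i).countP (fun j => pvTriS cs j == T) := by
    rw [pvOld, List.count_eq_countP, List.countP_map]; rfl
  have hnwc : (pvNw cs i c).count T
      = (pvWin cs i).countP (fun j => String.ofList (pvNewT cs i j c) == T) := by
    rw [pvNw, List.count_eq_countP, List.countP_map]; rfl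
  rw [hcnt, hcnt, holdc, hnwc, hlm, hsplit]
  rw [List.countP_append, List.countP_append, List.countP_append, List.countP_append]
  have e1 : (List.range' 0 (i-2)).countP (fun j => pvTriS (pvMod cs i c) j == T)
      = (List.range' 0 (i-2)).countP (fun j => pvTriS cs j == T) :=
    List.countP_congr (fun x hx => by rw [hpre x hx])
  have e2 : (List.range' (min i (cs.length - 3) + 1)
        (cs.length - 2 - (min i (cs.length - 3) + 1))).countP (fun j => pvTriS (pvMod cs i c) j == T)
      = (List.range' (min i (cs.length - 3) + 1)
        (cs.length - 2 - (min i (cs.length - 3) + 1))).countP (fun j => pvTriS cs j == T) :=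
    List.countP_congr (fun x hx => by rw [hpost x hx])
  have e3 : (pvWin cs i).countP (fun j => pvTriS (pvMod cs i c) j == T)
      = (pvWin cs i).countP (fun j => String.ofList (pvNewT cs i j c) == T) :=
    List.countP_congr (fun x hx => by unfold pvTriS; rw [hmid x hx])
  rw [e1, e2, e3]
  omega

lemma pv_pyRange_zero_toNat (a : Int) :
    PySem.List.pyRange 0 a 1 = (List.range a.toNat).map (fun k : Nat => (k : Int)) := by
  rw [PySem.List.pyRange_one]
  have h2 : (a - 0).toNat = a.toNat := by omega
  rw [h2]
  exact List.map_congr_left (fun x _ => by omega)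

lemma pv_tri_explicit (ds : List Char) (k : Nat) (h : k + 2 < ds.length) :
    pvTri ds k = [ds.getD k ' ', ds.getD (k+1) ' ', ds.getD (k+2) ' '] := by
  unfold pvTri
  rw [List.getD_eq_getElem _ _ (by omega), List.getD_eq_getElem _ _ (by omega),
      List.getD_eq_getElem _ _ (by omega),
      List.drop_eq_getElem_cons (l := ds) (i := k) (by omega),
      List.drop_eq_getElem_cons (l := ds) (i := k+1) (by omega),
      List.drop_eq_getElem_cons (l := ds) (i := k+2) (by omega)]
  simp only [List.take_succ_cons, List.take_zero]

lemma pv_shape_triple (a b c : Char) : pvShape [a, b, c] = (a != b && b == c) := rfl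

lemma pv_slice_tri (ds : List Char) (k : Nat) :
    PySem.List.slice ds (some (k : Int)) (some ((k : Int) + 3)) = pvTri ds k := by
  rw [show ((k:Int) + 3) = ((k:Int) + ((3:Nat):Int)) by push_cast; ring,
      PySem.List.slice_natCast_add]
  rfl

lemma pv_toNat_sub2 (n : Nat) : ((n : Int) - 2).toNat = n - 2 := by omega

lemma pv_counts_body_eq (ds : List Char) :
    (fun (d : PySem.Dict String Int) (k : Nat) =>
      (fun (d : PySem.Dict String Int) (i : Int) =>
        let sub := String.ofList (PySem.List.slice ds (some i) (some (i + 3)))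
        let d' := if d.contains sub then d else d.insert sub 0
        d'.modify sub 0 (· + 1)) d (k : Int))
    = (fun (d : PySem.Dict String Int) (k : Nat) =>
        (if d.contains (pvTriS ds k) then d else d.insert (pvTriS ds k) 0).modify
          (pvTriS ds k) 0 (· + 1)) := by
  funext d k
  simp only [pv_slice_tri]
  rfl

lemma pv_findMoos_counts_getD (ds : List Char) (v : String) :
    ((PySem.List.pyRange 0 ((ds.length : Int) - 2) 1).foldl (fun d i =>
      let sub := String.ofList (PySem.List.slice ds (some i) (some (i + 3)))
      let d' := if d.contains sub then d else d.insert sub 0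
      d'.modify sub 0 (· + 1)) (PySem.Dict.empty : PySem.Dict String Int)).getD v 0
    = ((pvTS ds).count v : Int) := by
  rw [pv_pyRange_zero_toNat, List.foldl_map, pv_counts_body_eq,
      ← List.foldl_map (f := pvTriS ds)
        (g := fun d x => (if PySem.Dict.contains d x then d else d.insert x 0).modify x 0 (· + 1)),
      pv_toNat_sub2]
  rw [show (List.range (ds.length - 2)).map (pvTriS ds) = pvTS ds from rfl]
  rw [pv_counts_getD]
  simp

lemma pv_findMoos_counts_contains (ds : List Char) (v : String) :
    ((PySem.List.pyRange 0 ((ds.length : Int) - 2) 1).foldl (fun d i =>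
      let sub := String.ofList (PySem.List.slice ds (some i) (some (i + 3)))
      let d' := if d.contains sub then d else d.insert sub 0
      d'.modify sub 0 (· + 1)) (PySem.Dict.empty : PySem.Dict String Int)).contains v
    = decide (v ∈ pvTS ds) := by
  rw [pv_pyRange_zero_toNat, List.foldl_map, pv_counts_body_eq,
      ← List.foldl_map (f := pvTriS ds)
        (g := fun d x => (if PySem.Dict.contains d x then d else d.insert x 0).modify x 0 (· + 1)),
      pv_toNat_sub2]
  rw [show (List.range (ds.length - 2)).map (pvTriS ds) = pvTS ds from rfl]
  rw [pv_counts_contains]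
  simp [List.contains_iff_mem]

lemma pv_getD_cast1 (ds : List Char) (k : Nat) :
    PySem.List.pyGetD ds ((k : Int) + 1) ' ' = ds.getD (k + 1) ' ' := by
  rw [show ((k:Int) + 1) = (((k + 1 : Nat)) : Int) by push_cast; ring, PySem.List.pyGetD_natCast]

lemma pv_getD_cast2 (ds : List Char) (k : Nat) :
    PySem.List.pyGetD ds ((k : Int) + 2) ' ' = ds.getD (k + 2) ' ' := by
  rw [show ((k:Int) + 2) = (((k + 2 : Nat)) : Int) by push_cast; ring, PySem.List.pyGetD_natCast]

lemma pv_exists_pyRange_iff (b : Int) (Q : Int → Prop) :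
    (∃ i ∈ PySem.List.pyRange 0 b 1, Q i) ↔ ∃ k : Nat, k < b.toNat ∧ Q (k : Int) := by
  rw [pv_pyRange_zero_toNat]
  constructor
  · rintro ⟨i, hi, hq⟩
    obtain ⟨k, hk, rfl⟩ := List.mem_map.mp hi
    exact ⟨k, List.mem_range.mp hk, hq⟩
  · rintro ⟨k, hk, hq⟩
    exact ⟨(k : Int), List.mem_map.mpr ⟨k, List.mem_range.mpr hk, rfl⟩, hq⟩

lemma pv_findMoos_fold_mem (ds : List Char) (F : Int) (C : PySem.Dict String Int) (m : Int) (T : String) :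
    (T ∈ (PySem.List.pyRange 0 m 1).foldl (fun moos i =>
      if PySem.List.pyGetD ds i ' ' == PySem.List.pyGetD ds (i + 1) ' ' then moos
      else if i + 2 < (ds.length : Int) then
        if PySem.List.pyGetD ds (i + 1) ' ' == PySem.List.pyGetD ds (i + 2) ' ' then
          if C.contains (String.ofList [PySem.List.pyGetD ds i ' ', PySem.List.pyGetD ds (i + 1) ' ',
              PySem.List.pyGetD ds (i + 2) ' ']) && decide (F ≤ C.getD (String.ofList [PySem.List.pyGetD ds i ' ',
              PySem.List.pyGetD ds (i + 1) ' ', PySem.List.pyGetD ds (i + 2) ' ']) 0)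
          then PySem.Set.add moos (String.ofList [PySem.List.pyGetD ds i ' ', PySem.List.pyGetD ds (i + 1) ' ',
              PySem.List.pyGetD ds (i + 2) ' '])
          else moos
        else moos
      else moos) (PySem.Set.empty : PySem.Set String))
    ↔ ∃ i ∈ PySem.List.pyRange 0 m 1,
        ¬(PySem.List.pyGetD ds i ' ' = PySem.List.pyGetD ds (i + 1) ' ')
        ∧ i + 2 < (ds.length : Int)
        ∧ PySem.List.pyGetD ds (i + 1) ' ' = PySem.List.pyGetD ds (i + 2) ' '
        ∧ (C.contains (String.ofList [PySem.List.pyGetD ds i ' ', PySem.List.pyGetD ds (i + 1) ' ',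
              PySem.List.pyGetD ds (i + 2) ' ']) = true
           ∧ F ≤ C.getD (String.ofList [PySem.List.pyGetD ds i ' ',
              PySem.List.pyGetD ds (i + 1) ' ', PySem.List.pyGetD ds (i + 2) ' ']) 0)
        ∧ T = String.ofList [PySem.List.pyGetD ds i ' ', PySem.List.pyGetD ds (i + 1) ' ',
              PySem.List.pyGetD ds (i + 2) ' '] := by
  rw [pv_mem_foldl_step _ (fun i T' =>
        ¬(PySem.List.pyGetD ds i ' ' = PySem.List.pyGetD ds (i + 1) ' ')
        ∧ i + 2 < (ds.length : Int)
        ∧ PySem.List.pyGetD ds (i + 1) ' ' = PySem.List.pyGetD ds (i + 2) ' '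
        ∧ (C.contains (String.ofList [PySem.List.pyGetD ds i ' ', PySem.List.pyGetD ds (i + 1) ' ',
              PySem.List.pyGetD ds (i + 2) ' ']) = true
           ∧ F ≤ C.getD (String.ofList [PySem.List.pyGetD ds i ' ',
              PySem.List.pyGetD ds (i + 1) ' ', PySem.List.pyGetD ds (i + 2) ' ']) 0)
        ∧ T' = String.ofList [PySem.List.pyGetD ds i ' ', PySem.List.pyGetD ds (i + 1) ' ',
              PySem.List.pyGetD ds (i + 2) ' ']) ?hstep]
  · simp [PySem.Set.empty]
  · intro s x T'
    split_ifs with h1 h2 h3 h4 <;>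
      · simp only [PySem.Set.mem_add, beq_iff_eq, Bool.and_eq_true, decide_eq_true_eq,
          not_lt, ne_eq] at *
        first
        | tauto
        | exact ⟨Or.inl, fun h => h.elim id (fun h' => absurd h'.2.1 (by omega))⟩

-- the membership characterization of A's find_moos
lemma pv_mem_findMoos (ds : List Char) (F : Int) (T : String) :
    T ∈ findMoos ds F ↔ pvShape T.toList = true ∧ T ∈ pvTS ds ∧ F ≤ ((pvTS ds).count T : Int) := by
  unfold findMoos
  rw [pv_findMoos_fold_mem ds F _ _ T, pv_exists_pyRange_iff]
  have hC1 := pv_findMoos_counts_contains ds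
  have hC2 := pv_findMoos_counts_getD ds
  constructor
  · rintro ⟨k, hk, hne, hlt, heq, hcd, rfl⟩
    rw [pv_toNat_sub2] at hk
    have hk2 : k + 2 < ds.length := by omega
    simp only [PySem.List.pyGetD_natCast, pv_getD_cast1, pv_getD_cast2] at hne heq hcd ⊢
    have htri : String.ofList [ds.getD k ' ', ds.getD (k+1) ' ', ds.getD (k+2) ' '] = pvTriS ds k := by
      rw [pvTriS, pv_tri_explicit ds k hk2]
    rw [htri] at hcd ⊢
    have hmem : pvTriS ds k ∈ pvTS ds :=
      List.mem_map.mpr ⟨k, List.mem_range.mpr (by omega), rfl⟩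
    refine ⟨?_, hmem, ?_⟩
    · rw [pvTriS, pv_tri_explicit ds k hk2]
      simp only [String.toList_ofList, pv_shape_triple]
      simp only [bne_iff_ne, ne_eq, Bool.and_eq_true]
      exact ⟨by simpa using hne, by simpa using heq⟩
    · rw [hC2 (pvTriS ds k)] at hcd
      exact_mod_cast hcd.2
  · rintro ⟨hsh, hmem, hcnt⟩
    obtain ⟨k, hk, rfl⟩ := List.mem_map.mp hmem
    rw [List.mem_range] at hk
    have hk2 : k + 2 < ds.length := by omega
    have htri : String.ofList [ds.getD k ' ', ds.getD (k+1) ' ', ds.getD (k+2) ' '] = pvTriS ds k := by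
      rw [pvTriS, pv_tri_explicit ds k hk2]
    have hsh' : ds.getD k ' ' ≠ ds.getD (k+1) ' ' ∧ ds.getD (k+1) ' ' = ds.getD (k+2) ' ' := by
      have h0 := hsh
      rw [pvTriS, pv_tri_explicit ds k hk2] at h0
      simpa [pv_shape_triple] using h0
    refine ⟨k, by rw [pv_toNat_sub2]; omega, ?_⟩
    simp only [PySem.List.pyGetD_natCast, pv_getD_cast1, pv_getD_cast2]
    refine ⟨hsh'.1, by push_cast; omega, hsh'.2, ⟨?_, ?_⟩, htri.symm⟩
    · rw [htri, hC1]
      simpa using hmem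
    · rw [htri, hC2]
      exact_mod_cast hcnt

lemma pv_pos_length (cs : List Char) (T : String) :
    (pvPos cs T).length = (pvTS cs).count T := by
  rw [pvPos, pvTS, List.count_eq_countP, List.countP_map, ← List.countP_eq_length_filter]
  rfl

lemma pv_pos_pairwise (cs : List Char) (T : String) : (pvPos cs T).Pairwise (· < ·) :=
  List.Pairwise.sublist (List.filter_sublist) (List.pairwise_lt_range)

lemma pv_mem_pos (cs : List Char) (T : String) (j : Nat) :
    j ∈ pvPos cs T ↔ j < cs.length - 2 ∧ pvTriS cs j = T := by
  simp [pvPos, List.mem_filter, List.mem_range]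

lemma pv_posD_getD (cs : List Char) (T : String) :
    ((PySem.List.pyRange 0 ((cs.length : Int) - 2) 1).foldl (fun d j =>
      d.insert (String.ofList (PySem.List.slice cs (some j) (some (j + 3))))
        (d.getD (String.ofList (PySem.List.slice cs (some j) (some (j + 3)))) [] ++ [j]))
      (PySem.Dict.empty : PySem.Dict String (List Int))).getD T []
    = (pvPos cs T).map (fun k : Nat => (k : Int)) := by
  rw [pv_pos_getD (fun j => String.ofList (PySem.List.slice cs (some j) (some (j + 3))))]
  rw [pv_pyRange_zero_toNat, List.filter_map, pv_toNat_sub2]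
  simp only [PySem.Dict.getD_empty, List.nil_append]
  congr 1
  apply List.filter_congr
  intro j _
  simp only [Function.comp_apply, pv_slice_tri]
  rfl

lemma pv_posD_mem_keys (cs : List Char) (T : String) :
    (T ∈ ((PySem.List.pyRange 0 ((cs.length : Int) - 2) 1).foldl (fun d j =>
      d.insert (String.ofList (PySem.List.slice cs (some j) (some (j + 3))))
        (d.getD (String.ofList (PySem.List.slice cs (some j) (some (j + 3)))) [] ++ [j]))
      (PySem.Dict.empty : PySem.Dict String (List Int))).keys)
    ↔ T ∈ pvTS cs := by
  rw [pv_pos_mem_keys (fun j => String.ofList (PySem.List.slice cs (some j) (some (j + 3))))]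
  simp only [PySem.Dict.keys_empty]
  rw [pv_exists_pyRange_iff ((cs.length : Int) - 2) (fun i => String.ofList (PySem.List.slice cs (some i) (some (i + 3))) = T)]
  constructor
  · rintro (h | ⟨k, hk, hgj⟩)
    · simp at h
    · rw [pv_toNat_sub2] at hk
      rw [pv_slice_tri] at hgj
      exact List.mem_map.mpr ⟨k, List.mem_range.mpr hk, hgj⟩
  · intro h
    obtain ⟨k, hk, rfl⟩ := List.mem_map.mp h
    rw [List.mem_range] at hk
    exact Or.inr ⟨k, by rw [pv_toNat_sub2]; omega, by rw [pv_slice_tri]; rfl⟩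

lemma pv_posD_nodup_keys (cs : List Char) :
    ((PySem.List.pyRange 0 ((cs.length : Int) - 2) 1).foldl (fun d j =>
      d.insert (String.ofList (PySem.List.slice cs (some j) (some (j + 3))))
        (d.getD (String.ofList (PySem.List.slice cs (some j) (some (j + 3)))) [] ++ [j]))
      (PySem.Dict.empty : PySem.Dict String (List Int))).keys.Nodup :=
  PySem.Dict.nodup_keys_foldl_insert_key _ _
    (fun d j => d.getD (String.ofList (PySem.List.slice cs (some j) (some (j + 3)))) [] ++ [j]) _
    PySem.Dict.nodup_keys_empty

lemma pv_exists_alpha (ch : Char) :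
    ∃ c ∈ "abcdefghijklmnopqrstuvwxyz".toList, c ≠ ch := by
  by_cases h : ch = 'a'
  · exact ⟨'b', by decide, by rw [h]; decide⟩
  · exact ⟨'a', by decide, fun hc => h hc.symm⟩

lemma pv_free_nat (N : Int) (cs : List Char) (T : String) :
    freeIndexExists N ((pvPos cs T).map (fun k : Nat => (k : Int))) = true
    ↔ ∃ k : Nat, (k : Int) < N ∧ ∀ j ∈ pvPos cs T, ¬(j ≤ k ∧ k ≤ j + 2) := by
  unfold freeIndexExists
  rw [pv_freeGo_spec N _ 0 (by
    rw [List.pairwise_map]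
    exact (pv_pos_pairwise cs T).imp (by intro a b h; exact_mod_cast h))]
  constructor
  · rintro ⟨i, h0, hN, hall⟩
    refine ⟨i.toNat, by omega, fun j hj hblk => ?_⟩
    exact hall (j : Int) (List.mem_map.mpr ⟨j, hj, rfl⟩) (by omega)
  · rintro ⟨k, hN, hall⟩
    refine ⟨(k : Int), by omega, hN, fun p hp => ?_⟩
    obtain ⟨j, hj, rfl⟩ := List.mem_map.mp hp
    have := hall j hj
    omega

lemma pv_window_eq (cs : List Char) (k : Nat) (hL : 3 ≤ cs.length) (hk : k < cs.length) :
    PySem.List.pyRange (if (k : Int) < 2 then 0 else (k : Int) - 2)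
      ((if (k : Int) ≤ (cs.length : Int) - 3 then (k : Int) else (cs.length : Int) - 3) + 1) 1
    = (pvWin cs k).map (fun j : Nat => (j : Int)) := by
  rw [PySem.List.pyRange_one, pvWin, List.range'_eq_map_range]
  rw [List.map_map]
  have hlen : (((if (k : Int) ≤ (cs.length : Int) - 3 then (k : Int) else (cs.length : Int) - 3) + 1)
      - (if (k : Int) < 2 then 0 else (k : Int) - 2)).toNat
      = min k (cs.length - 3) + 1 - (k - 2) := by
    split_ifs <;> omega
  rw [hlen]
  apply List.map_congr_left
  intro m hm
  rw [List.mem_range] at hm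
  simp only [Function.comp_apply]
  split_ifs <;> push_cast <;> omega

lemma pv_old_eq (cs : List Char) (k : Nat) (hL : 3 ≤ cs.length) (hk : k < cs.length) :
    ((pvWin cs k).map (fun j : Nat => (j : Int))).map
      (fun j => String.ofList (PySem.List.slice cs (some j) (some (j + 3))))
    = pvOld cs k := by
  rw [List.map_map, pvOld]
  apply List.map_congr_left
  intro j _
  simp only [Function.comp_apply, pv_slice_tri]
  rfl

lemma pv_nw_eq (cs : List Char) (k : Nat) (c : Char) (hL : 3 ≤ cs.length) (hk : k < cs.length) :
    ((pvWin cs k).map (fun j : Nat => (j : Int))).map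
      (fun j => String.ofList (PySem.List.slice cs (some j) (some (k : Int)) ++ [c]
          ++ PySem.List.slice cs (some ((k : Int) + 1)) (some (j + 3))))
    = pvNw cs k c := by
  rw [List.map_map, pvNw]
  apply List.map_congr_left
  intro j _
  simp only [Function.comp_apply]
  congr 1
  rw [PySem.List.slice_natCast,
      show ((k : Int) + 1) = (((k + 1 : Nat)) : Int) by push_cast; ring,
      show ((j : Int) + 3) = (((j + 3 : Nat)) : Int) by push_cast; ring,
      PySem.List.slice_natCast]
  rfl

def pvFm (F : Int) : Int := if F > 1 then F else 1

def pvCan (N F : Int) (cs : List Char) (T : String) : Prop :=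
  ∃ k : Nat, (k : Int) < N ∧ ∃ c ∈ "abcdefghijklmnopqrstuvwxyz".toList, c ≠ cs.getD k ' ' ∧
    pvShape T.toList = true ∧ T ∈ pvTS (pvMod cs k c) ∧ F ≤ ((pvTS (pvMod cs k c)).count T : Int)

def pvCan' (N F : Int) (cs : List Char) (T : String) : Prop :=
  ∃ k : Nat, (k : Int) < N ∧ ∃ c ∈ "abcdefghijklmnopqrstuvwxyz".toList, c ≠ cs.getD k ' ' ∧
    pvShape T.toList = true ∧ pvFm F ≤ ((pvTS (pvMod cs k c)).count T : Int)

def pvSurv (N F : Int) (cs : List Char) (T : String) : Prop :=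
  T ∈ pvTS cs ∧ pvShape T.toList = true ∧ pvFm F ≤ ((pvTS cs).count T : Int) ∧
    ∃ k : Nat, (k : Int) < N ∧ ∀ j ∈ pvPos cs T, ¬(j ≤ k ∧ k ≤ j + 2)

def pvLocal (N F : Int) (cs : List Char) (T : String) : Prop :=
  ∃ k : Nat, (k : Int) < N ∧ ∃ c ∈ "abcdefghijklmnopqrstuvwxyz".toList, c ≠ cs.getD k ' ' ∧
    (T ∈ pvOld cs k ∨ T ∈ pvNw cs k c) ∧ pvShape T.toList = true ∧
    pvFm F ≤ ((pvTS cs).count T : Int) - ((pvOld cs k).count T : Int) + ((pvNw cs k c).count T : Int)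

lemma pv_fm_pos (F : Int) : 1 ≤ pvFm F := by unfold pvFm; split_ifs <;> omega

lemma pv_can_iff_can' (N F : Int) (cs : List Char) (T : String) :
    pvCan N F cs T ↔ pvCan' N F cs T := by
  unfold pvCan pvCan'
  constructor
  · rintro ⟨k, hk, c, hc, hne, hsh, hmem, hcnt⟩
    refine ⟨k, hk, c, hc, hne, hsh, ?_⟩
    have := List.count_pos_iff.mpr hmem
    unfold pvFm; split_ifs <;> omega
  · rintro ⟨k, hk, c, hc, hne, hsh, hcnt⟩
    have h1 := pv_fm_pos F
    have hmem : T ∈ pvTS (pvMod cs k c) := List.count_pos_iff.mp (by omega)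
    refine ⟨k, hk, c, hc, hne, hsh, hmem, ?_⟩
    unfold pvFm at hcnt; split_ifs at hcnt <;> omega

lemma pv_can'_iff (N F : Int) (cs : List Char) (T : String)
    (hL : 3 ≤ cs.length) (hN : N ≤ (cs.length : Int)) :
    pvCan' N F cs T ↔ pvSurv N F cs T ∨ pvLocal N F cs T := by
  constructor
  · rintro ⟨k, hk, c, hc, hne, hsh, hcnt⟩
    have hkL : k < cs.length := by omega
    have hCE := pv_count_eq cs k c T hL hkL
    by_cases hT : T ∈ pvOld cs k ∨ T ∈ pvNw cs k c
    · right
      exact ⟨k, hk, c, hc, hne, hT, hsh, by omega⟩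
    · left
      push_neg at hT
      have ho : (pvOld cs k).count T = 0 := List.count_eq_zero.mpr hT.1
      have hn : (pvNw cs k c).count T = 0 := List.count_eq_zero.mpr hT.2
      have hbase : pvFm F ≤ ((pvTS cs).count T : Int) := by omega
      have hmem : T ∈ pvTS cs :=
        List.count_pos_iff.mp (by have := pv_fm_pos F; omega)
      refine ⟨hmem, hsh, hbase, k, hk, fun j hj hblk => ?_⟩
      rw [pv_mem_pos] at hj
      have hjw : j ∈ pvWin cs k := by
        rw [pv_mem_win cs k j hL hkL]
        exact ⟨by omega, by omega, by omega⟩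
      exact hT.1 (by rw [← hj.2]; exact List.mem_map.mpr ⟨j, hjw, rfl⟩)
  · rintro (⟨hmem, hsh, hcnt, k, hk, hfree⟩ | ⟨k, hk, c, hc, hne, hT, hsh, hcnt⟩)
    · have hkL : k < cs.length := by omega
      obtain ⟨c, hc, hne⟩ := pv_exists_alpha (cs.getD k ' ')
      have hCE := pv_count_eq cs k c T hL hkL
      have ho : (pvOld cs k).count T = 0 := by
        rw [List.count_eq_zero]
        intro hmemo
        obtain ⟨j, hjw, hjT⟩ := List.mem_map.mp hmemo
        rw [pv_mem_win cs k j hL hkL] at hjw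
        have hjp : j ∈ pvPos cs T := by
          rw [pv_mem_pos]
          exact ⟨by omega, hjT⟩
        exact hfree j hjp ⟨by omega, by omega⟩
      exact ⟨k, hk, c, hc, hne, hsh, by omega⟩
    · have hkL : k < cs.length := by omega
      have hCE := pv_count_eq cs k c T hL hkL
      exact ⟨k, hk, c, hc, hne, hsh, by omega⟩

lemma pv_mem_A_fold (N F : Int) (cs : List Char) (hN : N ≤ (cs.length : Int)) (T : String) :
    (T ∈ (PySem.List.pyRange 0 N 1).foldl (fun acc i =>
      "abcdefghijklmnopqrstuvwxyz".toList.foldl (fun acc c =>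
        if PySem.List.pyGetD cs i ' ' == c then acc
        else PySem.Set.update acc (findMoos (PySem.List.slice cs none (some i) ++ [c]
              ++ PySem.List.slice cs (some (i + 1)) none) F)) acc)
      (PySem.Set.empty : PySem.Set String))
    ↔ pvCan N F cs T := by
  rw [pv_mem_foldl_step _ (fun i T' => ∃ c ∈ "abcdefghijklmnopqrstuvwxyz".toList,
        ¬(PySem.List.pyGetD cs i ' ' = c) ∧ T' ∈ findMoos (PySem.List.slice cs none (some i) ++ [c]
          ++ PySem.List.slice cs (some (i + 1)) none) F) ?houter]
  case houter =>
    intro s x T'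
    rw [pv_mem_foldl_step _ (fun c T' => ¬(PySem.List.pyGetD cs x ' ' = c)
          ∧ T' ∈ findMoos (PySem.List.slice cs none (some x) ++ [c]
            ++ PySem.List.slice cs (some (x + 1)) none) F) ?hinner]
    case hinner =>
      intro s' c T''
      split_ifs with h
      · simp only [beq_iff_eq] at h
        simp [h]
      · simp only [beq_iff_eq] at h
        simp [PySem.Set.mem_update, h]
  · rw [pv_exists_pyRange_iff]
    unfold pvCan
    constructor
    · rintro (h | ⟨k, hk, c, hc, hne, hmem⟩)
      · simp [PySem.Set.empty] at h
      · have hkL : k < cs.length := by omega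
        rw [PySem.List.pyGetD_natCast] at hne
        rw [PySem.List.slice_to_natCast,
            show ((k : Int) + 1) = (((k + 1 : Nat)) : Int) by push_cast; ring,
            PySem.List.slice_from_natCast] at hmem
        rw [pv_mem_findMoos] at hmem
        exact ⟨k, by omega, c, hc, fun h => hne h.symm, hmem.1, hmem.2.1, hmem.2.2⟩
    · rintro ⟨k, hk, c, hc, hne, hsh, hmem, hcnt⟩
      right
      refine ⟨k, by omega, c, hc, ?_, ?_⟩
      · rw [PySem.List.pyGetD_natCast]
        exact fun h => hne h.symm
      · rw [PySem.List.slice_to_natCast,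
            show ((k : Int) + 1) = (((k + 1 : Nat)) : Int) by push_cast; ring,
            PySem.List.slice_from_natCast, pv_mem_findMoos]
        exact ⟨hsh, hmem, hcnt⟩

lemma pv_shape_eq (t : List Char) :
    ((PySem.List.pyGetD t 0 ' ' != PySem.List.pyGetD t 1 ' ')
      && (PySem.List.pyGetD t 1 ' ' == PySem.List.pyGetD t 2 ' ')) = pvShape t := rfl

lemma pv_mem_B_res1 (N F : Int) (cs : List Char) (D : PySem.Dict String (List Int))
    (hg : ∀ T', D.getD T' [] = (pvPos cs T').map (fun k : Nat => (k : Int)))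
    (hk : ∀ T', T' ∈ D.keys ↔ T' ∈ pvTS cs) (hnd : D.keys.Nodup) (T : String) :
    (T ∈ D.items.foldl (fun r tp =>
      if (PySem.List.pyGetD tp.1.toList 0 ' ' != PySem.List.pyGetD tp.1.toList 1 ' ')
         && (PySem.List.pyGetD tp.1.toList 1 ' ' == PySem.List.pyGetD tp.1.toList 2 ' ')
         && decide ((if F > 1 then F else 1) ≤ (tp.2.length : Int)) && freeIndexExists N tp.2
      then PySem.Set.add r tp.1 else r) (PySem.Set.empty : PySem.Set String))
    ↔ pvSurv N F cs T := by
  rw [pv_mem_foldl_step _ (fun tp T' =>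
      ((PySem.List.pyGetD tp.1.toList 0 ' ' != PySem.List.pyGetD tp.1.toList 1 ' ')
         && (PySem.List.pyGetD tp.1.toList 1 ' ' == PySem.List.pyGetD tp.1.toList 2 ' ')
         && decide ((if F > 1 then F else 1) ≤ ((tp.2 : List Int).length : Int))
         && freeIndexExists N tp.2) = true ∧ T' = tp.1) ?hstep]
  case hstep =>
    intro s x T'
    rcases Bool.eq_false_or_eq_true ((PySem.List.pyGetD x.1.toList 0 ' ' != PySem.List.pyGetD x.1.toList 1 ' ')
         && (PySem.List.pyGetD x.1.toList 1 ' ' == PySem.List.pyGetD x.1.toList 2 ' ')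
         && decide ((if F > 1 then F else 1) ≤ ((x.2 : List Int).length : Int))
         && freeIndexExists N x.2) with hc | hc
    · simp only [hc, if_false, Bool.false_eq_true]
      simp [hc]
    · simp only [hc, if_true]
      simp [PySem.Set.mem_add, hc]
  · rw [PySem.Dict.items_eq_map_keys D hnd []]
    unfold pvSurv
    constructor
    · rintro (h | ⟨tp, htp, hcond, rfl⟩)
      · simp [PySem.Set.empty] at h
      · obtain ⟨K, hK, rfl⟩ := List.mem_map.mp htp
        simp only at hcond ⊢
        rw [hg K] at hcond
        simp only [pv_shape_eq, Bool.and_eq_true, decide_eq_true_eq, List.length_map] at hcond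
        rw [pv_free_nat] at hcond
        refine ⟨(hk K).mp hK, hcond.1.1, ?_, hcond.2⟩
        rw [← pv_pos_length]
        unfold pvFm
        exact_mod_cast hcond.1.2
    · rintro ⟨hmem, hsh, hcnt, k, hkN, hfree⟩
      right
      refine ⟨(T, D.getD T []), List.mem_map.mpr ⟨T, (hk T).mpr hmem, rfl⟩, ?_, rfl⟩
      simp only [hg T]
      simp only [pv_shape_eq, Bool.and_eq_true, decide_eq_true_eq, List.length_map]
      rw [pv_free_nat]
      refine ⟨⟨hsh, ?_⟩, k, hkN, hfree⟩
      unfold pvFm at hcnt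
      rw [pv_pos_length]
      exact_mod_cast hcnt

lemma pv_mem_B_local (N F : Int) (cs : List Char) (D : PySem.Dict String (List Int))
    (hg : ∀ T', D.getD T' [] = (pvPos cs T').map (fun k : Nat => (k : Int)))
    (hL : 3 ≤ cs.length) (hN : N ≤ (cs.length : Int)) (r0 : PySem.Set String) (T : String) :
    (T ∈ (PySem.List.pyRange 0 N 1).foldl (fun r i =>
      "abcdefghijklmnopqrstuvwxyz".toList.foldl (fun r c =>
        if c == PySem.List.pyGetD cs i ' ' then r
        else
          (PySem.Set.union (PySem.Set.ofList ((PySem.List.pyRange (if i < 2 then 0 else i - 2)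
              ((if i ≤ (cs.length : Int) - 3 then i else (cs.length : Int) - 3) + 1) 1).map (fun j => String.ofList (PySem.List.slice cs (some j) (some (j + 3)))))) (PySem.Set.ofList ((PySem.List.pyRange (if i < 2 then 0 else i - 2)
              ((if i ≤ (cs.length : Int) - 3 then i else (cs.length : Int) - 3) + 1) 1).map (fun j => String.ofList (PySem.List.slice cs (some j) (some i) ++ [c] ++ PySem.List.slice cs (some (i + 1)) (some (j + 3))))))).foldl (fun r t =>
            if (PySem.List.pyGetD t.toList 0 ' ' != PySem.List.pyGetD t.toList 1 ' ')
               && (PySem.List.pyGetD t.toList 1 ' ' == PySem.List.pyGetD t.toList 2 ' ')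
               && decide ((if F > 1 then F else 1) ≤ ((D.getD t []).length : Int) - (((PySem.List.pyRange (if i < 2 then 0 else i - 2)
              ((if i ≤ (cs.length : Int) - 3 then i else (cs.length : Int) - 3) + 1) 1).map (fun j => String.ofList (PySem.List.slice cs (some j) (some (j + 3))))).count t : Int) + (((PySem.List.pyRange (if i < 2 then 0 else i - 2)
              ((if i ≤ (cs.length : Int) - 3 then i else (cs.length : Int) - 3) + 1) 1).map (fun j => String.ofList (PySem.List.slice cs (some j) (some i) ++ [c] ++ PySem.List.slice cs (some (i + 1)) (some (j + 3))))).count t : Int))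
            then PySem.Set.add r t else r) r) r) r0)
    ↔ T ∈ r0 ∨ pvLocal N F cs T := by
  rw [pv_mem_foldl_step _ (fun i T' => ∃ c ∈ "abcdefghijklmnopqrstuvwxyz".toList, ¬(c = PySem.List.pyGetD cs i ' ') ∧ ∃ u, (u ∈ ((PySem.List.pyRange (if i < 2 then 0 else i - 2)
              ((if i ≤ (cs.length : Int) - 3 then i else (cs.length : Int) - 3) + 1) 1).map (fun j => String.ofList (PySem.List.slice cs (some j) (some (j + 3))))) ∨ u ∈ ((PySem.List.pyRange (if i < 2 then 0 else i - 2)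
              ((if i ≤ (cs.length : Int) - 3 then i else (cs.length : Int) - 3) + 1) 1).map (fun j => String.ofList (PySem.List.slice cs (some j) (some i) ++ [c] ++ PySem.List.slice cs (some (i + 1)) (some (j + 3)))))) ∧ (pvShape u.toList = true ∧ (if F > 1 then F else 1) ≤ ((D.getD u []).length : Int) - (((PySem.List.pyRange (if i < 2 then 0 else i - 2)
              ((if i ≤ (cs.length : Int) - 3 then i else (cs.length : Int) - 3) + 1) 1).map (fun j => String.ofList (PySem.List.slice cs (some j) (some (j + 3))))).count u : Int) + (((PySem.List.pyRange (if i < 2 then 0 else i - 2)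
              ((if i ≤ (cs.length : Int) - 3 then i else (cs.length : Int) - 3) + 1) 1).map (fun j => String.ofList (PySem.List.slice cs (some j) (some i) ++ [c] ++ PySem.List.slice cs (some (i + 1)) (some (j + 3))))).count u : Int)) ∧ T' = u) ?houter]
  case houter =>
    intro s x T'
    rw [pv_mem_foldl_step _ (fun c T' => ¬(c = PySem.List.pyGetD cs x ' ') ∧ ∃ u, (u ∈ ((PySem.List.pyRange (if x < 2 then 0 else x - 2)
              ((if x ≤ (cs.length : Int) - 3 then x else (cs.length : Int) - 3) + 1) 1).map (fun j => String.ofList (PySem.List.slice cs (some j) (some (j + 3))))) ∨ u ∈ ((PySem.List.pyRange (if x < 2 then 0 else x - 2)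
              ((if x ≤ (cs.length : Int) - 3 then x else (cs.length : Int) - 3) + 1) 1).map (fun j => String.ofList (PySem.List.slice cs (some j) (some x) ++ [c] ++ PySem.List.slice cs (some (x + 1)) (some (j + 3)))))) ∧ (pvShape u.toList = true ∧ (if F > 1 then F else 1) ≤ ((D.getD u []).length : Int) - (((PySem.List.pyRange (if x < 2 then 0 else x - 2)
              ((if x ≤ (cs.length : Int) - 3 then x else (cs.length : Int) - 3) + 1) 1).map (fun j => String.ofList (PySem.List.slice cs (some j) (some (j + 3))))).count u : Int) + (((PySem.List.pyRange (if x < 2 then 0 else x - 2)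
              ((if x ≤ (cs.length : Int) - 3 then x else (cs.length : Int) - 3) + 1) 1).map (fun j => String.ofList (PySem.List.slice cs (some j) (some x) ++ [c] ++ PySem.List.slice cs (some (x + 1)) (some (j + 3))))).count u : Int)) ∧ T' = u) ?hinner]
    case hinner =>
      intro s' c T''
      rcases Bool.eq_false_or_eq_true (c == PySem.List.pyGetD cs x ' ') with hcc | hcc
      swap
      · rw [if_neg (by simp [hcc])]
        rw [pv_mem_foldl_step _ (fun u T'' => (pvShape u.toList = true ∧ (if F > 1 then F else 1) ≤ ((D.getD u []).length : Int) - (((PySem.List.pyRange (if x < 2 then 0 else x - 2)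
              ((if x ≤ (cs.length : Int) - 3 then x else (cs.length : Int) - 3) + 1) 1).map (fun j => String.ofList (PySem.List.slice cs (some j) (some (j + 3))))).count u : Int) + (((PySem.List.pyRange (if x < 2 then 0 else x - 2)
              ((if x ≤ (cs.length : Int) - 3 then x else (cs.length : Int) - 3) + 1) 1).map (fun j => String.ofList (PySem.List.slice cs (some j) (some x) ++ [c] ++ PySem.List.slice cs (some (x + 1)) (some (j + 3))))).count u : Int)) ∧ T'' = u) ?hu]
        case hu =>
          intro s'' u T₃
          rcases Bool.eq_false_or_eq_true ((PySem.List.pyGetD u.toList 0 ' ' != PySem.List.pyGetD u.toList 1 ' ')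
               && (PySem.List.pyGetD u.toList 1 ' ' == PySem.List.pyGetD u.toList 2 ' ')
               && decide ((if F > 1 then F else 1) ≤ ((D.getD u []).length : Int) - (((PySem.List.pyRange (if x < 2 then 0 else x - 2)
              ((if x ≤ (cs.length : Int) - 3 then x else (cs.length : Int) - 3) + 1) 1).map (fun j => String.ofList (PySem.List.slice cs (some j) (some (j + 3))))).count u : Int) + (((PySem.List.pyRange (if x < 2 then 0 else x - 2)
              ((if x ≤ (cs.length : Int) - 3 then x else (cs.length : Int) - 3) + 1) 1).map (fun j => String.ofList (PySem.List.slice cs (some j) (some x) ++ [c] ++ PySem.List.slice cs (some (x + 1)) (some (j + 3))))).count u : Int))) with hc | hc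
          swap
          · rw [Bool.eq_false_iff] at hc
            rw [if_neg hc]
            refine ⟨Or.inl, fun h => h.elim id (fun h' => ?_)⟩
            exfalso
            have hAB := h'.1.1
            rw [← pv_shape_eq, Bool.and_eq_true] at hAB
            exact hc (by
              simp only [Bool.and_eq_true, decide_eq_true_eq]
              exact ⟨hAB, h'.1.2⟩)
          · rw [if_pos hc]
            rw [Bool.and_eq_true, Bool.and_eq_true, decide_eq_true_eq] at hc
            rw [PySem.Set.mem_add]
            constructor
            · rintro (h | rfl)
              · exact Or.inl h
              · refine Or.inr ⟨⟨?_, hc.2⟩, rfl⟩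
                rw [← pv_shape_eq, Bool.and_eq_true]
                exact hc.1
            · rintro (h | ⟨_, rfl⟩)
              · exact Or.inl h
              · exact Or.inr rfl
        · have hccP : ¬(c = PySem.List.pyGetD cs x ' ') := by simpa using hcc
          constructor
          · rintro (h | ⟨u, hu, hP, hTu⟩)
            · exact Or.inl h
            · refine Or.inr ⟨hccP, u, ?_, hP, hTu⟩
              rw [PySem.Set.mem_union, PySem.Set.mem_ofList, PySem.Set.mem_ofList] at hu
              exact hu
          · rintro (h | ⟨_, u, hu, hP, hTu⟩)
            · exact Or.inl h
            · refine Or.inr ⟨u, ?_, hP, hTu⟩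
              rw [PySem.Set.mem_union, PySem.Set.mem_ofList, PySem.Set.mem_ofList]
              exact hu
      · rw [if_pos hcc]
        simp only [beq_iff_eq] at hcc
        constructor
        · exact Or.inl
        · rintro (h | ⟨hne, _⟩)
          · exact h
          · exact absurd hcc hne
  · rw [pv_exists_pyRange_iff]
    constructor
    · rintro (h | ⟨k, hkN, c, hc, hne, u, humem, ⟨hsh, hcnt⟩, hTu⟩)
      · exact Or.inl h
      · right
        rw [← hTu] at humem hcnt hsh
        have hkL : k < cs.length := by omega
        rw [pv_window_eq cs k hL hkL, pv_old_eq cs k hL hkL, pv_nw_eq cs k c hL hkL] at humem hcnt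
        rw [hg T, List.length_map, pv_pos_length] at hcnt
        rw [PySem.List.pyGetD_natCast] at hne
        exact ⟨k, by omega, c, hc, hne, humem, hsh, hcnt⟩
    · rintro (h | ⟨k, hkN, c, hc, hne, humem, hsh, hcnt⟩)
      · exact Or.inl h
      · right
        have hkL : k < cs.length := by omega
        refine ⟨k, by omega, c, hc, ?_, T, ?_, ⟨hsh, ?_⟩, rfl⟩
        · rw [PySem.List.pyGetD_natCast]
          exact hne
        · rw [pv_window_eq cs k hL hkL, pv_old_eq cs k hL hkL, pv_nw_eq cs k c hL hkL]
          exact humem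
        · rw [pv_window_eq cs k hL hkL, pv_old_eq cs k hL hkL, pv_nw_eq cs k c hL hkL,
              hg T, List.length_map, pv_pos_length]
          exact hcnt

lemma pv_window_nil' (cs : List Char) (i : Int) (hL : cs.length < 3) :
    PySem.List.pyRange (if i < 2 then 0 else i - 2)
      ((if i ≤ (cs.length : Int) - 3 then i else (cs.length : Int) - 3) + 1) 1 = [] := by
  apply PySem.List.pyRange_one_eq_nil
  split_ifs <;> omega

lemma pv_mem_B_local_nil (N F : Int) (cs : List Char) (D : PySem.Dict String (List Int))
    (hL : cs.length < 3) (r0 : PySem.Set String) (T : String) :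
    (T ∈ (PySem.List.pyRange 0 N 1).foldl (fun r i =>
      "abcdefghijklmnopqrstuvwxyz".toList.foldl (fun r c =>
        if c == PySem.List.pyGetD cs i ' ' then r
        else
          (PySem.Set.union (PySem.Set.ofList ((PySem.List.pyRange (if i < 2 then 0 else i - 2)
              ((if i ≤ (cs.length : Int) - 3 then i else (cs.length : Int) - 3) + 1) 1).map (fun j => String.ofList (PySem.List.slice cs (some j) (some (j + 3)))))) (PySem.Set.ofList ((PySem.List.pyRange (if i < 2 then 0 else i - 2)
              ((if i ≤ (cs.length : Int) - 3 then i else (cs.length : Int) - 3) + 1) 1).map (fun j => String.ofList (PySem.List.slice cs (some j) (some i) ++ [c] ++ PySem.List.slice cs (some (i + 1)) (some (j + 3))))))).foldl (fun r t =>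
            if (PySem.List.pyGetD t.toList 0 ' ' != PySem.List.pyGetD t.toList 1 ' ')
               && (PySem.List.pyGetD t.toList 1 ' ' == PySem.List.pyGetD t.toList 2 ' ')
               && decide ((if F > 1 then F else 1) ≤ ((D.getD t []).length : Int) - (((PySem.List.pyRange (if i < 2 then 0 else i - 2)
              ((if i ≤ (cs.length : Int) - 3 then i else (cs.length : Int) - 3) + 1) 1).map (fun j => String.ofList (PySem.List.slice cs (some j) (some (j + 3))))).count t : Int) + (((PySem.List.pyRange (if i < 2 then 0 else i - 2)
              ((if i ≤ (cs.length : Int) - 3 then i else (cs.length : Int) - 3) + 1) 1).map (fun j => String.ofList (PySem.List.slice cs (some j) (some i) ++ [c] ++ PySem.List.slice cs (some (i + 1)) (some (j + 3))))).count t : Int))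
            then PySem.Set.add r t else r) r) r) r0)
    ↔ T ∈ r0 := by
  rw [pv_mem_foldl_step _ (fun _ _ => False) ?hstep]
  · simp
  · intro s x T'
    simp only [pv_window_nil' cs x hL, List.map_nil]
    have hu : (PySem.Set.union (PySem.Set.ofList ([] : List String))
        (PySem.Set.ofList ([] : List String))) = ([] : List String) := rfl
    rw [hu]
    simp only [List.foldl_nil]
    have : ∀ (l : List Char) (s' : PySem.Set String),
        l.foldl (fun r c => if c == PySem.List.pyGetD cs x ' ' then r else r) s' = s' := by
      intro l
      induction l with
      | nil => intro s'; rfl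
      | cons a as ih => intro s'; rw [List.foldl_cons, ite_self]; exact ih s'
    rw [this]
    simp

lemma pv_nodup_ite (b : Bool) (s t : List String) (h1 : List.Nodup s) (h2 : List.Nodup t) :
    List.Nodup (if b = true then s else t) := by
  cases b
  · simpa using h2
  · simpa using h1

theorem pv_main (N F : Int) (s : String) (hPre : N ≤ (s.toList.length : Int)) :
    possible_moos N F s = possible_moos_alt N F s := by
  simp only [possible_moos, possible_moos_alt]
  rw [PySem.List.sorted_id_eq_sorted_id_iff_perm]
  apply (List.perm_ext_iff_of_nodup ?_ ?_).mpr
  · intro T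
    have hA := pv_mem_A_fold N F s.toList hPre T
    have hg := pv_posD_getD s.toList
    have hk := pv_posD_mem_keys s.toList
    have hnd := pv_posD_nodup_keys s.toList
    by_cases hL3 : 3 ≤ s.toList.length
    · refine hA.trans (Iff.symm ?_)
      refine (pv_mem_B_local N F s.toList _ hg hL3 (by omega) _ T).trans ?_
      rw [pv_mem_B_res1 N F s.toList _ hg hk hnd T]
      rw [pv_can_iff_can']
      exact (pv_can'_iff N F s.toList T hL3 (by omega)).symm
    · refine hA.trans (Iff.symm ?_)
      refine (pv_mem_B_local_nil N F s.toList _ (by omega) _ T).trans ?_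
      rw [pv_mem_B_res1 N F s.toList _ hg hk hnd T]
      have hTS : pvTS s.toList = [] := by
        have h0 : s.toList.length - 2 = 0 := by omega
        rw [pvTS, h0]
        rfl
      constructor
      · rintro ⟨hmem, _⟩
        rw [hTS] at hmem
        simp at hmem
      · rintro ⟨k, hkN, c, hc, hne, hsh, hmemM, hcnt⟩
        exfalso
        have hkL : k < s.toList.length := by omega
        have hlm := pv_length_mod s.toList k c hkL
        have h0 : (pvMod s.toList k c).length - 2 = 0 := by omega
        rw [pvTS, h0] at hmemM
        simp at hmemM
  · refine pv_nodup_foldl_step _ (fun s1 x hs1 =>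
      pv_nodup_foldl_step _ (fun s2 c hs2 =>
        pv_nodup_ite _ _ _ hs2 (PySem.Set.nodup_update _ _ hs2)) _ _ hs1) _ _ ?_
    exact List.nodup_nil
  · refine pv_nodup_foldl_step _ (fun s1 x hs1 =>
      pv_nodup_foldl_step _ (fun s2 c hs2 =>
        pv_nodup_ite _ _ _ hs2
          (pv_nodup_foldl_step _ (fun s3 u hs3 =>
            pv_nodup_ite _ _ _ (PySem.Set.nodup_add _ _ hs3) hs3) _ _ hs2)) _ _ hs1) _ _ ?_
    refine pv_nodup_foldl_step _ (fun s1 tp hs1 =>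
      pv_nodup_ite _ _ _ (PySem.Set.nodup_add _ _ hs1) hs1) _ _ ?_
    exact List.nodup_nil

-- ===== VERDICT (by name: the statement is the Claim_ definition above) =====
theorem possible_moos_spec : Claim_equal_possible_moos := by
  intro N F s _ hPre
  unfold Spec_possible_moos
  exact pv_main N F s hPre
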